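-- pv_equiv track=rewrite | github.com/Bryand701/Digital_Portfolio | Python/Universidad 2019/examenl.py | apariciones_seguidas
-- ===== SOURCE A (Python) =====
-- def digitos (n):
--
--     c = 0
--
-- #esta parte aría falta en caso de que entre un 0, para poder contarlo
-- #no lo puse porque en el primer ejercicio el número debe ser mayor o igual a uno y no hacía falta
-- #pero lo utilize en los otros ejercicios y se me olvidó agregar esta parte
--     #if n == 0:
--         #c = 1
--
--     while n != 0:
--         n = n //10
--         c += 1
--
--     return c
--
-- def apariciones_seguidas (repetido,veces,numero):
--
--     entero=0
--     d = digitos (numero)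
--     c = 0
--     c_2 = 0
--
--     if numero == 0:
--         return 0
--
--     while c < d:
-- #d_actual es digito actual abrebiado
--         d_actual = (numero//10**c)%10
--
--         if d_actual != repetido:
--
--             entero += d_actual * 10**c_2
--
--             c_2 += 1
--         else:
--             j=0
--             while j < veces:
--                 entero += d_actual * 10**c_2
--                 c_2 += 1
--                 j += 1
--         c += 1
--
--     return entero
-- ===== SOURCE B (Python) =====
-- def apariciones_seguidas(repetido, veces, numero):
--     # Recursive reconstruction: expand each digit block with a closed-form repunit
--     # instead of counting digits and looping positionally.
--     def go(n):
--         if n == 0: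
--             return 0
--         hi = go(n // 10)
--         d = n % 10
--         if d != repetido:
--             return hi * 10 + d
--         reps = max(veces, 0)
--         return hi * 10 ** reps + d * ((10 ** reps - 1) // 9)
--     return go(numero)
-- ===== Notes on version B (the rewrite author's own statement) =====
-- stated objective: simpler
-- what changed: Replaces A's digit-count pass plus positional while-loops with powers of 10 by a single structural recursion on numero that appends each digit block via a closed-form repunit ((10**reps-1)//9) instead of an inner repetition loop.
import Mathlib
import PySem

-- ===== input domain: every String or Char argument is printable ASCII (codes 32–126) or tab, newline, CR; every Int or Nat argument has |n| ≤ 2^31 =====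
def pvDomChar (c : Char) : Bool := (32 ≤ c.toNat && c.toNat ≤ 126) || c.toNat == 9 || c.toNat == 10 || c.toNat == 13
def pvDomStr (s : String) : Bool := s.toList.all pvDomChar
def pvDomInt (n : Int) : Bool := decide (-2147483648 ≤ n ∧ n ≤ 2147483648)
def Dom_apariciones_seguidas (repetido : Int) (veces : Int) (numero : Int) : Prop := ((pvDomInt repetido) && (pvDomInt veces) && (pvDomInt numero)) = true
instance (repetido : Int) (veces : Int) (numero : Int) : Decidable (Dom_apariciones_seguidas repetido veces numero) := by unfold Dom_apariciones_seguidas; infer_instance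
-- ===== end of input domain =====

-- B replaces A's digit-count + positional while-loops with a single structural recursion on the
-- number, expanding a matching digit with a closed-form repunit (objective: simpler).

-- ===== PORT A =====
-- while n != 0: n //= 10; c += 1  (fuel only makes the loop total; 64 ≥ any digit count of |n| ≤ 2^31;
-- for numero < 0 the Python loop never terminates — excluded by Pre_)
def digitosFuel : Nat → Int → Int → Int
  | 0, _, c => c
  | f + 1, n, c => if n ≠ 0 then digitosFuel f (PySem.Int.floordiv n 10) (c + 1) else c

def digitos (n : Int) : Int := digitosFuel 64 n 0

-- one iteration of A's outer while-loop, state (entero, c_2), position c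
def stepA (repetido veces numero : Int) (st : Int × Int) (c : Int) : Int × Int :=
  let d_actual := PySem.Int.mod (PySem.Int.floordiv numero (10 ^ c.toNat)) 10
  if d_actual ≠ repetido then (st.1 + d_actual * 10 ^ st.2.toNat, st.2 + 1)
  else (PySem.List.pyRange 0 veces 1).foldl
        (fun st2 _ => (st2.1 + d_actual * 10 ^ st2.2.toNat, st2.2 + 1)) st

def apariciones_seguidas (repetido : Int) (veces : Int) (numero : Int) : Int :=
  let d := digitos numero
  if numero = 0 then 0
  else ((PySem.List.pyRange 0 d 1).foldl (stepA repetido veces numero) ((0 : Int), (0 : Int))).1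

-- ===== PORT B =====
-- go(n): recursive reconstruction; for n < 0 Python's go recurses forever (outside Pre_), the
-- 'n < 0 → 0' branch only makes the Lean function total.
def altGo (repetido veces : Int) (n : Int) : Int :=
  if h0 : n = 0 then 0
  else if hneg : n < 0 then 0
  else
    let hi := altGo repetido veces (PySem.Int.floordiv n 10)
    let d := PySem.Int.mod n 10
    if d ≠ repetido then hi * 10 + d
    else hi * 10 ^ (max veces 0).toNat
         + d * PySem.Int.floordiv (10 ^ (max veces 0).toNat - 1) 9
termination_by n.toNat
decreasing_by
  rw [PySem.Int.floordiv_eq_ediv_of_pos (by norm_num)]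
  omega

def apariciones_seguidas_alt (repetido : Int) (veces : Int) (numero : Int) : Int :=
  altGo repetido veces numero

-- ===== PRECONDITION & SPEC =====
-- Pre_ excludes numero < 0, on which A's digit-counting loop (n //= 10) never reaches 0 and the
-- Python function diverges (B's recursion diverges there too).
def Pre_apariciones_seguidas (repetido : Int) (veces : Int) (numero : Int) : Prop := 0 ≤ numero
instance (repetido : Int) (veces : Int) (numero : Int) : Decidable (Pre_apariciones_seguidas repetido veces numero) := by unfold Pre_apariciones_seguidas; infer_instance

def pvWitness_apariciones_seguidas : Int × Int × Int := (5, 3, 1505)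

def Spec_apariciones_seguidas (repetido : Int) (veces : Int) (numero : Int) (out : Int) : Prop := out = apariciones_seguidas_alt repetido veces numero
instance (repetido : Int) (veces : Int) (numero : Int) (out : Int) : Decidable (Spec_apariciones_seguidas repetido veces numero out) := by unfold Spec_apariciones_seguidas; infer_instance

-- ===== CLAIM (what is proved, stated in full; the proofs are below) =====
def Claim_equal_apariciones_seguidas : Prop := ∀ (repetido : Int) (veces : Int) (numero : Int), Dom_apariciones_seguidas repetido veces numero → Pre_apariciones_seguidas repetido veces numero → Spec_apariciones_seguidas repetido veces numero (apariciones_seguidas repetido veces numero)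

-- ===== LEMMAS AND PROOFS =====

-- digit count on Nat (proof-side mirror of `digitos` on the nonnegative domain)
def nd (m : Nat) : Nat :=
  if m = 0 then 0 else nd (m / 10) + 1
decreasing_by omega

theorem nd_zero : nd 0 = 0 := by simp [nd]

theorem nd_pos (m : Nat) (h : m ≠ 0) : nd m = nd (m / 10) + 1 := by
  rw [nd]; simp [h]

theorem digitosFuel_eq : ∀ (f : Nat) (m : Nat) (c : Int), m < 10 ^ f →
    digitosFuel f (m : Int) c = c + nd m := by
  intro f
  induction f with
  | zero => intro m c h; interval_cases m; simp [digitosFuel, nd_zero]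
  | succ f ih =>
    intro m c h
    by_cases hm : m = 0
    · subst hm; simp [digitosFuel, nd_zero]
    · rw [digitosFuel]
      have : ((m : Int) ≠ 0) := by exact_mod_cast hm
      simp only [this, if_pos, ne_eq, not_false_eq_true, if_true]
      rw [show PySem.Int.floordiv (m : Int) 10 = ((m / 10 : Nat) : Int) by
        exact_mod_cast PySem.Int.floordiv_natCast m 10]
      rw [ih (m / 10) (c + 1) (by
        have : 10 ^ (f + 1) = 10 ^ f * 10 := by ring
        omega)]
      rw [nd_pos m hm]; push_cast; ring

theorem digitos_eq (m : Nat) (h : m < 10 ^ 64) : digitos (m : Int) = (nd m : Int) := by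
  unfold digitos
  rw [digitosFuel_eq 64 m 0 h]; ring

-- repunit: value of the inner while-loop's geometric accumulation
def repu : Nat → Int
  | 0 => 0
  | k + 1 => 1 + 10 * repu k

theorem nine_mul_repu (k : Nat) : 9 * repu k = 10 ^ k - 1 := by
  induction k with
  | zero => simp [repu]
  | succ k ih => rw [repu]; push_cast; ring_nf; ring_nf at ih; omega

theorem repu_eq_floordiv (k : Nat) :
    repu k = PySem.Int.floordiv ((10 : Int) ^ k - 1) 9 := by
  rw [PySem.Int.floordiv_eq_ediv_of_pos (by norm_num)]
  rw [← nine_mul_repu k]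
  rw [Int.mul_ediv_cancel_left _ (by norm_num)]

-- A's inner while-loop (ignores the loop variable): closed form
theorem inner_fold {α : Type} (d : Int) : ∀ (l : List α) (e c2 : Int), 0 ≤ c2 →
    l.foldl (fun st2 (_ : α) => (st2.1 + d * 10 ^ st2.2.toNat, st2.2 + 1)) (e, c2)
      = (e + d * repu l.length * 10 ^ c2.toNat, c2 + l.length) := by
  intro l
  induction l with
  | nil => intro e c2 _; simp [repu]
  | cons x xs ih =>
    intro e c2 hc2
    simp only [List.foldl_cons, List.length_cons]
    rw [ih _ _ (by omega)]
    have hpow : (c2 + 1).toNat = c2.toNat + 1 := by omega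
    simp only [Prod.mk.injEq]
    constructor
    · rw [hpow, repu]; ring
    · push_cast; ring

-- stepA at a Nat position
def stepN (repetido veces numero : Int) (st : Int × Int) (c : Nat) : Int × Int :=
  stepA repetido veces numero st (c : Int)

theorem stepN_shift (repetido veces : Int) (m : Nat) (st : Int × Int) (c : Nat) :
    stepN repetido veces (m : Int) st (c + 1)
      = stepN repetido veces ((m / 10 : Nat) : Int) st c := by
  unfold stepN stepA
  have h1 : ((c : Int) + 1).toNat = c + 1 := by omega
  have h2 : ((c : Nat) : Int).toNat = c := by omega
  rw [show ((c + 1 : Nat) : Int) = (c : Int) + 1 by push_cast; ring] at *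
  simp only [h1, h2]
  rw [show PySem.Int.floordiv (m : Int) (10 ^ (c + 1))
        = PySem.Int.floordiv ((m / 10 : Nat) : Int) (10 ^ c) from ?_]
  · rw [show ((10 : Int) ^ (c + 1)) = (((10 ^ (c + 1) : Nat)) : Int) by push_cast; ring,
        show ((10 : Int) ^ c) = (((10 ^ c : Nat)) : Int) by push_cast; ring,
        PySem.Int.floordiv_natCast, PySem.Int.floordiv_natCast]
    congr 1
    rw [Nat.div_div_eq_div_mul]
    congr 1
    ring

-- expanded length of B's result (proof-side)
def elen (repetido veces : Int) : Nat → Nat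
  | 0 => 0
  | m + 1 =>
    let m' := m + 1
    elen repetido veces (m' / 10)
      + (if (((m' % 10 : Nat) : Int)) ≠ repetido then 1 else (max veces 0).toNat)
decreasing_by omega

theorem elen_pos (repetido veces : Int) (m : Nat) (hm : m ≠ 0) :
    elen repetido veces m = elen repetido veces (m / 10)
      + (if (((m % 10 : Nat) : Int)) ≠ repetido then 1 else (max veces 0).toNat) := by
  cases m with
  | zero => exact absurd rfl hm
  | succ m => rw [elen]

theorem altGo_natCast (repetido veces : Int) (m : Nat) (hm : m ≠ 0) :
    altGo repetido veces (m : Int)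
      = (if (((m % 10 : Nat) : Int)) ≠ repetido then
          altGo repetido veces ((m / 10 : Nat) : Int) * 10 + ((m % 10 : Nat) : Int)
        else
          altGo repetido veces ((m / 10 : Nat) : Int) * 10 ^ (max veces 0).toNat
            + ((m % 10 : Nat) : Int) * PySem.Int.floordiv (10 ^ (max veces 0).toNat - 1) 9) := by
  rw [altGo]
  have h0 : ((m : Int) ≠ 0) := by exact_mod_cast hm
  have hneg : ¬ ((m : Int) < 0) := by omega
  simp only [h0, hneg, dif_neg, not_false_eq_true, dite_false, if_false]
  rw [show PySem.Int.floordiv (m : Int) 10 = ((m / 10 : Nat) : Int) by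
        exact_mod_cast PySem.Int.floordiv_natCast m 10,
      show PySem.Int.mod (m : Int) 10 = ((m % 10 : Nat) : Int) by
        exact_mod_cast PySem.Int.mod_natCast m 10]

-- main invariant: A's outer fold from any state equals B's recursion, shifted into position
theorem main_fold (repetido veces : Int) : ∀ (m : Nat) (e c2 : Int), 0 ≤ c2 →
    (List.range (nd m)).foldl (stepN repetido veces (m : Int)) (e, c2)
      = (e + altGo repetido veces (m : Int) * 10 ^ c2.toNat,
         c2 + (elen repetido veces m : Int)) := by
  intro m
  induction m using Nat.strong_induction_on with
  | _ m ih =>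
    intro e c2 hc2
    by_cases hm : m = 0
    · subst hm
      simp [nd_zero, elen, altGo]
    · rw [nd_pos m hm, List.range_succ_eq_map, List.foldl_cons, List.foldl_map]
      have hstep : (fun (st : Int × Int) (c : Nat) => stepN repetido veces (m : Int) st (c + 1))
          = stepN repetido veces ((m / 10 : Nat) : Int) := by
        funext st c; exact stepN_shift repetido veces m st c
      have hshift : ∀ st, (List.range (nd (m / 10))).foldl
            (fun (st : Int × Int) (c : Nat) => stepN repetido veces (m : Int) st (c + 1)) st
          = (List.range (nd (m / 10))).foldl (stepN repetido veces ((m / 10 : Nat) : Int)) st := by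
        intro st; rw [hstep]
      -- the first step (position 0)
      have hstep0 : stepN repetido veces (m : Int) (e, c2) 0
          = (if (((m % 10 : Nat) : Int)) ≠ repetido then
              (e + ((m % 10 : Nat) : Int) * 10 ^ c2.toNat, c2 + 1)
            else
              (e + ((m % 10 : Nat) : Int) * repu (max veces 0).toNat * 10 ^ c2.toNat,
               c2 + ((max veces 0).toNat : Int))) := by
        unfold stepN stepA
        simp only [Int.toNat_zero, pow_zero, Nat.cast_zero]
        rw [show PySem.Int.floordiv (m : Int) 1 = ((m : Nat) : Int) by
              have := PySem.Int.floordiv_natCast m 1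
              simpa using this,
            show PySem.Int.mod (m : Int) 10 = ((m % 10 : Nat) : Int) by
              exact_mod_cast PySem.Int.mod_natCast m 10]
        split_ifs with h
        · rfl
        · rw [PySem.List.pyRange_one 0 veces, List.foldl_map]
          rw [inner_fold _ _ _ _ hc2]
          simp only [List.length_range]
          have hlen : (veces - 0).toNat = (max veces 0).toNat := by omega
          rw [hlen]
      rw [hstep0]
      split_ifs with h
      · rw [hshift, ih (m / 10) (by omega) _ _ (by omega)]
        rw [altGo_natCast repetido veces m hm]
        simp only [h, if_pos, ne_eq, not_false_eq_true, if_true]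
        rw [elen_pos repetido veces m hm]
        simp only [h, if_pos, ne_eq, not_false_eq_true, if_true]
        have hpow : (c2 + 1).toNat = c2.toNat + 1 := by omega
        simp only [Prod.mk.injEq]
        constructor
        · rw [hpow]; ring
        · push_cast; ring
      · rw [hshift, ih (m / 10) (by omega) _ _ (by omega)]
        rw [altGo_natCast repetido veces m hm]
        simp only [h, if_neg, ne_eq, not_true_eq_false, if_false, not_not]
        rw [elen_pos repetido veces m hm]
        simp only [h, if_neg, ne_eq, not_true_eq_false, if_false, not_not]
        have hpow : (c2 + ((max veces 0).toNat : Int)).toNat = c2.toNat + (max veces 0).toNat := by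
          omega
        rw [← repu_eq_floordiv]
        simp only [Prod.mk.injEq]
        constructor
        · rw [hpow]; ring
        · push_cast; ring

-- ===== VERDICT (by name: the statement is the Claim_ definition above) =====
theorem apariciones_seguidas_spec : Claim_equal_apariciones_seguidas := by
  intro repetido veces numero hdom hpre
  unfold Spec_apariciones_seguidas apariciones_seguidas apariciones_seguidas_alt
  by_cases h0 : numero = 0
  · subst h0; simp [altGo]
  · simp only [h0, if_false]
    obtain ⟨m, rfl⟩ : ∃ m : Nat, numero = (m : Int) :=
      ⟨numero.toNat, by unfold Pre_apariciones_seguidas at hpre; omega⟩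
    have hmbound : m < 10 ^ 64 := by
      unfold Dom_apariciones_seguidas at hdom
      simp only [pvDomInt, Bool.and_eq_true, decide_eq_true_eq] at hdom
      have : (m : Int) ≤ 2147483648 := hdom.2.2
      have hm' : m ≤ 2147483648 := by exact_mod_cast this
      calc m ≤ 2147483648 := hm'
        _ < 10 ^ 64 := by norm_num
    rw [digitos_eq m hmbound]
    rw [show PySem.List.pyRange 0 ((nd m : Int)) 1
          = (List.range (nd m)).map (fun k : Nat => ((k : Int)))
        from ?_]
    · rw [List.foldl_map]
      have : (fun (st : Int × Int) (c : Nat) => stepA repetido veces (m : Int) st (c : Int))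
          = stepN repetido veces (m : Int) := by funext st c; rfl
      rw [this, main_fold repetido veces m 0 0 (by omega)]
      simp
    · rw [PySem.List.pyRange_one 0 ((nd m : Int))]
      have : ((nd m : Int) - 0).toNat = nd m := by omega
      rw [this]
      apply List.map_congr_left
      intro k _
      simp
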